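-- pv_equiv track=rewrite | github.com/lkwbr/compete | codejam/2021/quals/revsorteng.py | compute_burden
-- ===== SOURCE A (Python) =====
-- import copy
--
-- def compute_burden(arr: list) -> int:
--     arr = copy.deepcopy(arr)
--     total_burden = 0
--     for i, _ in enumerate(arr[:-1]):
--         l = arr[i:]
--         j = i + l.index(min(l))
--         sub = arr[i:j + 1]
--         arr[i:j + 1] = reversed(sub)
--         burden = j - i + 1
--         total_burden += burden
--     return total_burden
-- ===== SOURCE B (Python) =====
-- def compute_burden(arr: list) -> int:
--     # Shrinking-list formulation: instead of keeping the whole array and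
--     # reversing segments in place, drop the minimum each round and keep only
--     # the still-unsorted remainder (reversed prefix + untouched suffix).
--     total = 0
--     cur = list(arr)
--     while len(cur) >= 2:
--         j = cur.index(min(cur))
--         total += j + 1
--         cur = list(reversed(cur[:j])) + cur[j + 1:]
--     return total
-- ===== Notes on version B (the rewrite author's own statement) =====
-- stated objective: simpler
-- what changed: B replaces A's in-place segment-reversal simulation over a fixed array with index bookkeeping by a shrinking-list loop that each round finds the minimum, adds its position+1, and recurses on reversed-prefix ++ suffix with the minimum discarded.
import Mathlib
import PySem

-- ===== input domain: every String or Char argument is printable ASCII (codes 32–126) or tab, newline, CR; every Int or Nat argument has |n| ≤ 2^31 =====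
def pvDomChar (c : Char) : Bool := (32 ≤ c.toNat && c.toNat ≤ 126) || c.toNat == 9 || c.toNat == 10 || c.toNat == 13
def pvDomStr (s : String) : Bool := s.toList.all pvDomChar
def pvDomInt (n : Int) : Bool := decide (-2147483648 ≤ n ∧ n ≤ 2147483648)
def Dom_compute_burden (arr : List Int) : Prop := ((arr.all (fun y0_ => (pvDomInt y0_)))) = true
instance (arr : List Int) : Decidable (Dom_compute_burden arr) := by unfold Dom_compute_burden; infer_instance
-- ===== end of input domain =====

-- B replaces A's in-place segment-reversal loop over a fixed array by a shrinking-list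
-- loop that drops the minimum each round (simpler decomposition; same asymptotic cost).


-- ===== PORT A =====
-- loop body of A: state (arr, total_burden), loop variable i (element of enumerate is unused)
def pvStepA (st : List Int × Int) (ie : Int × Int) : List Int × Int :=
  let arr := st.1
  let i := ie.1
  let l := PySem.List.slice arr (some i) none            -- l = arr[i:]
  match PySem.List.min? l (fun v => v) with
  | none => st            -- unreachable: l is nonempty at every loop iteration (Python min would raise)
  | some m =>
    match PySem.List.index? l m with
    | none => st          -- unreachable: m ∈ l
    | some k =>
      let j : Int := i + (k : Int)                        -- j = i + l.index(min(l))
      let sub := PySem.List.slice arr (some i) (some (j + 1))   -- sub = arr[i:j+1]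
      (PySem.List.slice arr none (some i) ++ sub.reverse ++ PySem.List.slice arr (some (j + 1)) none,
        st.2 + (j - i + 1))                               -- arr[i:j+1] = reversed(sub); total += j-i+1

def compute_burden (arr : List Int) : Int :=
  -- copy.deepcopy(arr) is the identity on a list of ints (value-wise)
  (List.foldl pvStepA (arr, 0) (PySem.List.enumerate (PySem.List.slice arr none (some (-1))) 0)).2

-- ===== PORT B =====
-- while-loop of Source B: state (cur, total)
def pvAltGo (cur : List Int) (total : Int) : Int :=
  if _h : cur.length < 2 then total
  else
    match PySem.List.min? cur (fun v => v) with
    | none => total       -- unreachable: cur is nonempty here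
    | some m =>
      match hk : PySem.List.index? cur m with
      | none => total     -- unreachable: m ∈ cur
      | some j =>
        pvAltGo ((PySem.List.slice cur none (some (j : Int))).reverse
                  ++ PySem.List.slice cur (some ((j : Int) + 1)) none)
                (total + ((j : Int) + 1))
termination_by cur.length
decreasing_by
  obtain ⟨hj, -, -⟩ := PySem.List.getElem_of_index?_eq_some hk
  have h1 : PySem.List.slice cur none (some (j : Int)) = cur.take j :=
    PySem.List.slice_to_natCast cur j
  have h2 : PySem.List.slice cur (some ((j : Int) + 1)) none = cur.drop (j + 1) := by
    have := PySem.List.slice_from_natCast cur (j + 1)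
    simpa using this
  simp [h1, h2]
  omega

def compute_burden_alt (arr : List Int) : Int := pvAltGo arr 0

-- ===== PRECONDITION & SPEC =====
def Spec_compute_burden (arr : List Int) (out : Int) : Prop := out = compute_burden_alt arr
instance (arr : List Int) (out : Int) : Decidable (Spec_compute_burden arr out) := by unfold Spec_compute_burden; infer_instance

-- ===== CLAIM (what is proved, stated in full; the proofs are below) =====
def Claim_equal_compute_burden : Prop := ∀ (arr : List Int), Dom_compute_burden arr → Spec_compute_burden arr (compute_burden arr)

-- ===== LEMMAS AND PROOFS =====

theorem pv_loop_inv (es : List Int) : ∀ (s : Nat) (arr : List Int) (total : Int),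
    arr.length = s + es.length + 1 →
    (List.foldl pvStepA (arr, total) (PySem.List.enumerate es (s : Int))).2
      = pvAltGo (arr.drop s) total := by
  induction es with
  | nil =>
    intro s arr total hlen
    rw [PySem.List.enumerate_nil, List.foldl_nil, pvAltGo]
    have : (arr.drop s).length < 2 := by simp [hlen]
    rw [dif_pos this]
  | cons e es' ih =>
    intro s arr total hlen
    rw [PySem.List.enumerate_cons, List.foldl_cons]
    have hl_slice : PySem.List.slice arr (some (s : Int)) none = arr.drop s :=
      PySem.List.slice_from_natCast arr s
    have hlen_l : (arr.drop s).length = es'.length + 2 := by simp [hlen]; omega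
    obtain ⟨m, hm⟩ : ∃ m, PySem.List.min? (arr.drop s) (fun v => v) = some m := by
      cases hmin : PySem.List.min? (arr.drop s) (fun v => v) with
      | none =>
        rw [PySem.List.min?_eq_none_iff] at hmin
        simp [hmin] at hlen_l
      | some m => exact ⟨m, rfl⟩
    obtain ⟨k, hk⟩ : ∃ k, PySem.List.index? (arr.drop s) m = some k := by
      have : m ∈ arr.drop s := PySem.List.min?_mem hm
      rcases hki : PySem.List.index? (arr.drop s) m with _ | k
      · rw [PySem.List.index?_eq_none_iff] at hki; exact absurd this hki
      · exact ⟨k, rfl⟩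
    obtain ⟨hklt, hlk, -⟩ := PySem.List.getElem_of_index?_eq_some hk
    have hsub : PySem.List.slice arr (some (s : Int)) (some ((s : Int) + (k : Int) + 1))
        = (arr.drop s).take (k + 1) := by
      have hc : (s : Int) + (k : Int) + 1 = (s : Int) + ((k + 1 : Nat) : Int) := by push_cast; ring
      rw [hc, PySem.List.slice_natCast_add]
    have hdropj : PySem.List.slice arr (some ((s : Int) + (k : Int) + 1)) none
        = (arr.drop s).drop (k + 1) := by
      have hc : (s : Int) + (k : Int) + 1 = ((s + (k + 1) : Nat) : Int) := by push_cast; ring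
      rw [hc, PySem.List.slice_from_natCast]
      conv_rhs => rw [List.drop_drop]
    have hstep : pvStepA (arr, total) ((s : Int), e) =
        (arr.take s ++ ((arr.drop s).take (k + 1)).reverse ++ (arr.drop s).drop (k + 1),
          total + ((k : Int) + 1)) := by
      unfold pvStepA
      simp only [hl_slice, hm, hk, hsub, hdropj, PySem.List.slice_to_natCast]
      have harith : ((s : Int) + (k : Int) - (s : Int) + 1) = (k : Int) + 1 := by ring
      rw [harith]
    rw [hstep]
    have htake : (arr.drop s).take (k + 1) = (arr.drop s).take k ++ [m] := by
      rw [List.take_add_one]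
      congr 1
      simp [List.getElem?_eq_getElem hklt, hlk]
    have hslen : (arr.take s).length = s := by
      simp; omega
    have harr'len : (arr.take s ++ ((arr.drop s).take (k + 1)).reverse ++ (arr.drop s).drop (k + 1)).length
        = (s + 1) + es'.length + 1 := by
      have hklt' : s + k + 1 ≤ arr.length := by
        rw [List.length_drop] at hklt; omega
      have hlen' : arr.length = s + es'.length + 2 := by simpa using hlen
      simp only [List.length_append, List.length_reverse, List.length_take, List.length_drop]
      omega
    have key : (arr.take s ++ ((arr.drop s).take (k + 1)).reverse ++ (arr.drop s).drop (k + 1)).drop (s + 1)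
        = ((arr.drop s).take k).reverse ++ (arr.drop s).drop (k + 1) := by
      rw [List.append_assoc]
      have h1 : s + 1 = (arr.take s).length + 1 := by rw [hslen]
      rw [h1, List.drop_length_add_append]
      rw [htake, List.reverse_append]
      simp
    rw [show ((s : Int) + 1) = ((s + 1 : Nat) : Int) by push_cast; ring]
    rw [ih (s + 1) _ _ harr'len, key]
    conv_rhs => rw [pvAltGo]
    rw [dif_neg (by omega)]
    simp only [hm]
    split
    · next heq =>
      simp at heq
      exact absurd (PySem.List.min?_mem hm) heq
    · next j heq =>
      rw [hk] at heq
      injection heq with hjk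
      subst hjk
      have hdropj2 : PySem.List.slice (arr.drop s) (some ((k : Int) + 1)) none
          = (arr.drop s).drop (k + 1) := by
        have hc : (k : Int) + 1 = ((k + 1 : Nat) : Int) := by push_cast; ring
        rw [hc, PySem.List.slice_from_natCast]
      rw [PySem.List.slice_to_natCast, hdropj2]

-- ===== VERDICT (by name: the statement is the Claim_ definition above) =====
theorem compute_burden_spec : Claim_equal_compute_burden := by
  intro arr _
  unfold Spec_compute_burden compute_burden compute_burden_alt
  rw [PySem.List.slice_to_neg_one]
  cases arr with
  | nil =>
    rw [List.dropLast_nil, PySem.List.enumerate_nil, List.foldl_nil, pvAltGo]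
    rw [dif_pos (by simp)]
  | cons x t =>
    have hlen : (x :: t).length = 0 + (x :: t).dropLast.length + 1 := by
      simp [List.length_dropLast]
    have := pv_loop_inv ((x :: t).dropLast) 0 (x :: t) 0 hlen
    simpa using this
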